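-- pv_equiv track=rewrite | github.com/taitran54/ReviewSA | app/modules/lstmmodel.py | removeBackLoop
-- ===== SOURCE A (Python) =====
-- def removeBackLoop(word):
--     # print ("WORD TAG",word)
--     x = 0
--     #     word = word.replace(' ', '_')
--     for ch in range(len (word) - 1):
--         if word[len(word) - ch - 1] != word[len(word) - ch - 2]:
--             break
--         else:
--             x += 1
--     return word[:len(word) - x]
-- ===== SOURCE B (Python) =====
-- def removeBackLoop(word):
--     # Strip the trailing run of the last character down to a single copy,
--     # using rstrip instead of an index loop.
--     if not word:
--         return word
--     stripped = word.rstrip(word[-1])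
--     return word[:len(stripped) + 1]
-- ===== Notes on version B (the rewrite author's own statement) =====
-- stated objective: simpler
-- what changed: Replaces A's backward index loop counting repeated-pair comparisons with a direct rstrip of the last character followed by one slice that keeps a single copy of the trailing run.
import Mathlib
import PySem

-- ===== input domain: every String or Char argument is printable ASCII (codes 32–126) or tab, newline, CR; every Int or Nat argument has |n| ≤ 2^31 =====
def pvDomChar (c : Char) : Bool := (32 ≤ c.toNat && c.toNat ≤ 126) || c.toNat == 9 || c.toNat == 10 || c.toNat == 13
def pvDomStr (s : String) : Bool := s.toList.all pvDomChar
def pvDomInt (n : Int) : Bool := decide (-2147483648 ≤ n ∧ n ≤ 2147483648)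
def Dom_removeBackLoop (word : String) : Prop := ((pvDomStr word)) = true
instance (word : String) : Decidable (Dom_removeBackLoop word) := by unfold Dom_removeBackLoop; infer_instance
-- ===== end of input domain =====

-- B replaces A's backward index loop with rstrip of the last character (keep one copy); objective: simpler.

-- ===== PORT A =====
-- the 'for ch in range(len(word)-1): if … break else x += 1' loop of A, with x the accumulator;
-- both indices are always in range here, so pyGet? always returns some and the getD default is unreachable.
def removeBackLoopGo (s : List Char) (n : Int) : List Int → Nat → Nat
  | [], x => x
  | ch :: rest, x =>
    if (PySem.List.pyGet? s (n - ch - 1)).getD ' ' ≠ (PySem.List.pyGet? s (n - ch - 2)).getD ' ' then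
      x
    else
      removeBackLoopGo s n rest (x + 1)

def removeBackLoop (word : String) : String :=
  let s := word.toList
  let n : Int := s.length
  let x := removeBackLoopGo s n (PySem.List.pyRange 0 (n - 1) 1) 0
  String.ofList (PySem.List.slice s none (some (n - x)))  -- word[:len(word) - x]

-- ===== PORT B =====
-- word.rstrip(c): drop the trailing run of c — ported by hand (reverse/dropWhile/reverse),
-- exact for a single-character strip set, which is the only way B calls rstrip.
def rstripChar (s : List Char) (c : Char) : List Char :=
  (s.reverse.dropWhile (· == c)).reverse

def removeBackLoop_alt (word : String) : String :=
  let s := word.toList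
  match s.getLast? with
  | none => word                                   -- if not word: return word
  | some c =>
    let stripped := rstripChar s c                 -- word.rstrip(word[-1])
    String.ofList (PySem.List.slice s none (some ((stripped.length : Int) + 1)))  -- word[:len(stripped)+1]

-- ===== PRECONDITION & SPEC =====
def Spec_removeBackLoop (word : String) (out : String) : Prop := out = removeBackLoop_alt word
instance (word : String) (out : String) : Decidable (Spec_removeBackLoop word out) := by unfold Spec_removeBackLoop; infer_instance

-- ===== CLAIM (what is proved, stated in full; the proofs are below) =====
def Claim_equal_removeBackLoop : Prop := ∀ (word : String), Dom_removeBackLoop word → Spec_removeBackLoop word (removeBackLoop word)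

-- ===== LEMMAS AND PROOFS =====

-- number of initial adjacent equal pairs of a list (what A's loop counts along the reversed word)
def pairsCount : List Char → Nat
  | a :: b :: rest => if a = b then 1 + pairsCount (b :: rest) else 0
  | _ => 0

theorem pairsCount_eq_takeWhile (c : Char) (t : List Char) :
    pairsCount (c :: t) = (t.takeWhile (· == c)).length := by
  induction t generalizing c with
  | nil => simp [pairsCount]
  | cons b rest ih =>
    by_cases h : c = b
    · subst h
      simp [pairsCount, List.takeWhile, ih c, Nat.add_comm]
    · rw [pairsCount, if_neg h]
      have : (b == c) = false := by simp [Ne.symm h]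
      simp [List.takeWhile, this]

-- A's loop, started at index j with accumulator x, adds the pair count of the reversed word from j on
theorem removeBackLoopGo_eq (s : List Char) (hs : s ≠ []) (m : Nat) :
    ∀ j x : Nat, m = s.length - 1 - j → j ≤ s.length - 1 →
    removeBackLoopGo s (s.length : Int) (PySem.List.pyRange (j : Int) ((s.length : Int) - 1) 1) x
      = x + pairsCount (s.reverse.drop j) := by
  have hn : 1 ≤ s.length := List.length_pos_of_ne_nil hs
  induction m with
  | zero =>
    intro j x hm hj
    have hj' : j = s.length - 1 := by omega
    rw [PySem.List.pyRange_one_eq_nil (by omega : (s.length : Int) - 1 ≤ (j : Int))]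
    have hlen : (s.reverse.drop j).length = 1 := by
      simp [hj']; omega
    obtain ⟨a, ha⟩ := List.length_eq_one_iff.mp hlen
    rw [removeBackLoopGo, ha]
    simp [pairsCount]
  | succ m ih =>
    intro j x hm hj
    have hj1 : j + 1 < s.length := by omega
    have hjn : j < s.length := by omega
    rw [PySem.List.pyRange_one_cons (by omega : (j : Int) < (s.length : Int) - 1)]
    have hk1 : s.length - 1 - j < s.length := by omega
    have hk2 : s.length - 1 - (j+1) < s.length := by omega
    have e1 : (s.length : Int) - (j : Int) - 1 = ((s.length - 1 - j : Nat) : Int) := by omega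
    have e2 : (s.length : Int) - (j : Int) - 2 = ((s.length - 1 - (j+1) : Nat) : Int) := by omega
    have g1 : PySem.List.pyGet? s ((s.length : Int) - (j : Int) - 1) = some s[s.length - 1 - j] := by
      rw [e1]; simp [hk1]
    have g2 : PySem.List.pyGet? s ((s.length : Int) - (j : Int) - 2) = some s[s.length - 1 - (j+1)] := by
      rw [e2]; simp [hk2]
    have hr1 : s.reverse[j]'(by simpa using hjn) = s[s.length - 1 - j] := by
      simp [List.getElem_reverse]
    have hr2 : s.reverse[j+1]'(by simpa using hj1) = s[s.length - 1 - (j+1)] := by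
      simp [List.getElem_reverse]
    have hd1 : s.reverse.drop j = s.reverse[j]'(by simpa using hjn) :: s.reverse.drop (j+1) :=
      List.drop_eq_getElem_cons (by simpa using hjn)
    have hd2 : s.reverse.drop (j+1) = s.reverse[j+1]'(by simpa using hj1) :: s.reverse.drop (j+2) :=
      List.drop_eq_getElem_cons (by simpa using hj1)
    rw [removeBackLoopGo, g1, g2]
    by_cases hc : s[s.length - 1 - j] = s[s.length - 1 - (j+1)]
    · rw [if_neg (by simp [hc])]
      have : (j : Int) + 1 = ((j + 1 : Nat) : Int) := by push_cast; ring
      rw [this, ih (j+1) (x+1) (by omega) (by omega)]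
      rw [hd1, hd2, pairsCount, if_pos (by rw [hr1, hr2]; exact hc), ← hd2]
      omega
    · rw [if_pos (by simp [hc])]
      rw [hd1, hd2, pairsCount, if_neg (by rw [hr1, hr2]; exact hc)]
      omega

theorem removeBackLoop_eq_alt (word : String) : removeBackLoop word = removeBackLoop_alt word := by
  cases hg : word.toList.getLast? with
  | none =>
    have hnil : word.toList = [] := List.getLast?_eq_none_iff.mp hg
    simp [removeBackLoop, removeBackLoop_alt, hnil]
    have hw : String.ofList word.toList = word := String.ofList_toList
    conv_rhs => rw [← hw, hnil]
    congr 1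
  | some c =>
    set s := word.toList with hs
    have hsne : s ≠ [] := by
      intro h; rw [h] at hg; simp at hg
    have hrne : s.reverse ≠ [] := by simpa using hsne
    obtain ⟨c', t, hr⟩ := List.exists_cons_of_ne_nil hrne
    have hc' : c' = c := by
      have := List.getLast?_eq_head?_reverse (xs := s)
      rw [hr] at this; rw [hg] at this; simpa using this.symm
    rw [hc'] at hr
    have hn : s.length = t.length + 1 := by
      have := congrArg List.length hr; simpa using this
    have htw : (t.takeWhile (· == c)).length ≤ t.length := (List.takeWhile_sublist _).length_le
    have hx : removeBackLoopGo s (s.length : Int) (PySem.List.pyRange 0 ((s.length : Int) - 1) 1) 0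
        = (t.takeWhile (· == c)).length := by
      have := removeBackLoopGo_eq s hsne (s.length - 1) 0 0 (by omega) (by omega)
      rw [show ((0:Nat):Int) = (0:Int) from rfl] at this
      rw [this]
      simp [hr, pairsCount_eq_takeWhile]
    have hstrip : (rstripChar s c).length = t.length - (t.takeWhile (· == c)).length := by
      unfold rstripChar
      rw [hr]
      simp [List.dropWhile]
      have h2 : t.length = (t.takeWhile (· == c)).length + (t.dropWhile (· == c)).length := by
        conv_lhs => rw [← List.takeWhile_append_dropWhile (p := (· == c)) (l := t)]
        exact List.length_append
      omega
    show String.ofList (PySem.List.slice s none (some ((s.length : Int) - (removeBackLoopGo s (s.length : Int) (PySem.List.pyRange 0 ((s.length:Int) - 1) 1) 0 : Nat)))) = removeBackLoop_alt word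
    rw [hx]
    simp only [removeBackLoop_alt]
    rw [← hs, hg]
    congr 2
    simp only [Option.some.injEq]
    rw [hstrip]
    omega

-- ===== VERDICT (by name: the statement is the Claim_ definition above) =====
theorem removeBackLoop_spec : Claim_equal_removeBackLoop := by
  intro word _
  unfold Spec_removeBackLoop
  exact removeBackLoop_eq_alt word
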